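-- pv_equiv track=rewrite | github.com/wjstempniak/Dependency-Structure-of-Coordination | data_processing/test/test_extract.py | identical_deprel
-- ===== SOURCE A (Python) =====
-- def identical_deprel(token1, token2):
--     exceptions = [
--         ["subj", "subj:pass"],
--         ["nummod", "nummod:gov"]
--     ]
--
--     if token1["deprel"] == token2["deprel"]:
--         return True
--
--     for e in exceptions:
--         if token1["deprel"] in e and token2["deprel"] in e:
--             return True
--
--     return False
-- ===== SOURCE B (Python) =====
-- def identical_deprel(token1, token2):
--     a = token1["deprel"]
--     b = token2["deprel"]
--     if a == b:
--         return True
--     # order the two labels by length: a subtyped relation is longer than its base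
--     short, long = (a, b) if len(a) <= len(b) else (b, a)
--     # equivalent iff the longer one is a whitelisted subtyped relation whose base
--     # (the part before ':') is exactly the shorter one
--     return long in ("subj:pass", "nummod:gov") and long.split(":")[0] == short
-- ===== Notes on version B (the rewrite author's own statement) =====
-- stated objective: alternative
-- what changed: Instead of scanning a table of synonym pairs, B orders the two labels by length and checks string-structurally that the longer one is a whitelisted subtyped relation (subj:pass / nummod:gov) whose part before ':' equals the shorter label.
import Mathlib
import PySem

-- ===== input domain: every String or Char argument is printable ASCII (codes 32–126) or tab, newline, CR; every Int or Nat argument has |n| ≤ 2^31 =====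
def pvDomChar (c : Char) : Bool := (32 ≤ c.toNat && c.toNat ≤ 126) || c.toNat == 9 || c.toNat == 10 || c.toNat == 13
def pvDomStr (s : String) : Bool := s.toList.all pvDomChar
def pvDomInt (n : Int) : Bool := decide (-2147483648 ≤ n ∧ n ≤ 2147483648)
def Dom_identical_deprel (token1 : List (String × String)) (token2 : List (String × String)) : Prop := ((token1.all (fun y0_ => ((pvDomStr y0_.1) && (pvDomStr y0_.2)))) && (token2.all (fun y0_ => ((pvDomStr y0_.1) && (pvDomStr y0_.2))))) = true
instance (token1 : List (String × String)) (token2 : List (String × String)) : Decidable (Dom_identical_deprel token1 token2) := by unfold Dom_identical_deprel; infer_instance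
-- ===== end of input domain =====

-- B replaces A's scan over a table of synonym pairs by a string-structural check: order the
-- two labels by length and test that the longer one is a whitelisted subtyped relation
-- (subj:pass / nummod:gov) whose base — the part before ':' — equals the shorter (alternative).

-- ===== PORT A =====
-- the 'for e in exceptions' loop of A, step for step
def excScan (d1 d2 : String) : List (List String) → Bool
  | [] => false
  | e :: rest => if e.contains d1 && e.contains d2 then true else excScan d1 d2 rest

def identical_deprel (token1 : List (String × String)) (token2 : List (String × String)) : Bool :=
  match List.lookup "deprel" token1, List.lookup "deprel" token2 with
  | some d1, some d2 =>
    if d1 == d2 then true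
    else excScan d1 d2 [["subj", "subj:pass"], ["nummod", "nummod:gov"]]
  | _, _ => false  -- unreachable under Pre_ (KeyError in Python)

-- ===== PORT B =====
-- long.split(":")[0] of Source B; splitting on a nonempty separator never yields [], so [0] never raises
def baseOf (s : String) : String := ((PySem.List.pyGet? ((PySem.Str.split? s ":").getD []) 0).getD "")

def identical_deprel_alt (token1 : List (String × String)) (token2 : List (String × String)) : Bool :=
  match List.lookup "deprel" token1 with
  | none => false  -- unreachable under Pre_ (KeyError in Python)
  | some a =>
    match List.lookup "deprel" token2 with
    | none => false  -- unreachable under Pre_ (KeyError in Python)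
    | some b =>
      if a == b then true
      else
        let p := if PySem.Str.len a ≤ PySem.Str.len b then (a, b) else (b, a)
        (p.2 == "subj:pass" || p.2 == "nummod:gov") && (baseOf p.2 == p.1)

-- ===== PRECONDITION & SPEC =====
-- Pre_ excludes exactly the tokens without a "deprel" key, on which both Pythons raise KeyError.
def Pre_identical_deprel (token1 : List (String × String)) (token2 : List (String × String)) : Prop :=
  (List.lookup "deprel" token1).isSome = true ∧ (List.lookup "deprel" token2).isSome = true
instance (token1 : List (String × String)) (token2 : List (String × String)) : Decidable (Pre_identical_deprel token1 token2) := by unfold Pre_identical_deprel; infer_instance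

def pvWitness_identical_deprel : (List (String × String)) × (List (String × String)) :=
  ([("deprel", "subj")], [("deprel", "subj:pass")])

def Spec_identical_deprel (token1 : List (String × String)) (token2 : List (String × String)) (out : Bool) : Prop := out = identical_deprel_alt token1 token2
instance (token1 : List (String × String)) (token2 : List (String × String)) (out : Bool) : Decidable (Spec_identical_deprel token1 token2 out) := by unfold Spec_identical_deprel; infer_instance

-- ===== CLAIM =====
def Claim_equal_identical_deprel : Prop := ∀ (token1 : List (String × String)) (token2 : List (String × String)), Dom_identical_deprel token1 token2 → Pre_identical_deprel token1 token2 → Spec_identical_deprel token1 token2 (identical_deprel token1 token2)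

-- ===== LEMMAS AND PROOFS =====
theorem b1 : baseOf "subj:pass" = "subj" := by decide
theorem b2 : baseOf "nummod:gov" = "nummod" := by decide

theorem excScan_cons (d1 d2 : String) (e : List String) (rest : List (List String)) :
    excScan d1 d2 (e :: rest) = ((e.contains d1 && e.contains d2) || excScan d1 d2 rest) := by
  rw [excScan]; split_ifs with h <;> simp_all

theorem core (d1 d2 : String) :
    (if d1 == d2 then true
     else excScan d1 d2 [["subj", "subj:pass"], ["nummod", "nummod:gov"]])
    = (if d1 == d2 then true
       else
         let p := if PySem.Str.len d1 ≤ PySem.Str.len d2 then (d1, d2) else (d2, d1)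
         (p.2 == "subj:pass" || p.2 == "nummod:gov") && (baseOf p.2 == p.1)) := by
  by_cases h : d1 = d2
  · simp [h]
  · simp only [beq_iff_eq, h, if_false]
    rw [excScan_cons, excScan_cons, show excScan d1 d2 [] = false from rfl, Bool.or_false]
    rw [Bool.eq_iff_iff]
    simp only [List.contains_eq_mem, List.mem_cons, List.not_mem_nil, or_false,
      Bool.or_eq_true, Bool.and_eq_true, decide_eq_true_eq, beq_iff_eq]
    split_ifs with hlen <;> simp only <;> constructor
    · rintro (⟨(rfl | rfl), (rfl | rfl)⟩ | ⟨(rfl | rfl), (rfl | rfl)⟩) <;>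
        first
          | exact absurd rfl h
          | exact absurd hlen (by decide)
          | decide
    · rintro ⟨(rfl | rfl), hb⟩
      · rw [b1] at hb; subst hb; decide
      · rw [b2] at hb; subst hb; decide
    · rintro (⟨(rfl | rfl), (rfl | rfl)⟩ | ⟨(rfl | rfl), (rfl | rfl)⟩) <;>
        first
          | exact absurd rfl h
          | exact absurd (le_of_not_ge hlen) (by decide)
          | decide
    · rintro ⟨(rfl | rfl), hb⟩
      · rw [b1] at hb; subst hb; decide
      · rw [b2] at hb; subst hb; decide

-- ===== VERDICT =====
theorem identical_deprel_spec : Claim_equal_identical_deprel := by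
  intro t1 t2 _ hpre
  obtain ⟨h1, h2⟩ := hpre
  unfold Spec_identical_deprel identical_deprel identical_deprel_alt
  obtain ⟨a, ha⟩ := Option.isSome_iff_exists.mp h1
  obtain ⟨b, hb⟩ := Option.isSome_iff_exists.mp h2
  rw [ha, hb]
  exact core a b
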